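-- pv_equiv track=rewrite | github.com/KamenHH/Solututions-Programming-101-HackBulgaria-2019 | Week02/Day1/day1_improved.py | elevator_trips
-- ===== SOURCE A (Python) =====
-- def elevator_trips(people_weight, people_floors, elevator_floors, max_people, max_weight):
--     in_elevator = []
--     curr_weight = 0
--     trip_count = 0
--     people_count = 0
--     curr_floor = 1
--     people = [pair for pair in zip(people_weight, people_floors)]
--     while people:
--         while people and people_count + 1 <= max_people and curr_weight + people[0][0] <= max_weight:
--             person = people.pop(0)
--             in_elevator.append(person)
--             curr_weight += person[0]
--             people_count += 1
--         while in_elevator: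
--             curr_person = in_elevator.pop(0)
--             if curr_floor != curr_person[1]:
--                 curr_floor = curr_person[1]
--                 trip_count += 1
--         curr_floor = 1
--         trip_count += 1
--         curr_weight = 0
--         people_count = 0
--     return trip_count
-- ===== SOURCE B (Python) =====
-- def elevator_trips(people_weight, people_floors, elevator_floors, max_people, max_weight):
--     pairs = list(zip(people_weight, people_floors))
--     n = len(pairs)
--     # pass 1: split the queue into greedy batches of destination floors
--     batches = []
--     i = 0
--     while i < n:
--         floors = []
--         cap = max_weight
--         while i < n and len(floors) < max_people and pairs[i][0] <= cap:
--             cap -= pairs[i][0]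
--             floors.append(pairs[i][1])
--             i += 1
--         batches.append(floors)
--         # if nobody fits, i does not advance and this loop runs forever (like A)
--     # pass 2: count trips batch by batch
--     total = 0
--     for floors in batches:
--         prev = 1
--         for f in floors:
--             if f != prev:
--                 total += 1
--                 prev = f
--         total += 1
--     return total
-- ===== Notes on version B (the rewrite author's own statement) =====
-- stated objective: alternative
-- what changed: A interleaves loading and delivering in one mutating pop/append simulation (in_elevator, curr_weight, people_count, curr_floor reset each round); B is a staged two-pass algorithm: an index-based scan first splits the queue into a list of greedy floor batches, then a separate counting pass sums, per batch, the floor changes from floor 1 plus one return trip.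
import Mathlib
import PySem

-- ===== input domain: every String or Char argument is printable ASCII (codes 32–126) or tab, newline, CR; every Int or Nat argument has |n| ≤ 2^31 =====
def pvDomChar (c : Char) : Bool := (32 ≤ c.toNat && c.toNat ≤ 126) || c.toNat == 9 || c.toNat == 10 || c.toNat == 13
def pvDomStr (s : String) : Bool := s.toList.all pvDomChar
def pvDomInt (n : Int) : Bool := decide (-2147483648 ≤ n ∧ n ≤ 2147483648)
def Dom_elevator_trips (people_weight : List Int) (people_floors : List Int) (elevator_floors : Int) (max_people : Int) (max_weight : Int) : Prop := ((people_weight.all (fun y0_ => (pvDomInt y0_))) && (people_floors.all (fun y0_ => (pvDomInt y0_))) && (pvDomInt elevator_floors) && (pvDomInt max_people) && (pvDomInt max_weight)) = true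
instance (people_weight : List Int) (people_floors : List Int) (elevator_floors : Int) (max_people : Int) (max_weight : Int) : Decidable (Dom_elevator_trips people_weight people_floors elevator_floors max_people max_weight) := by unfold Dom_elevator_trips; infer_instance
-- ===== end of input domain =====

-- B replaces A's single interleaved pop/append simulation by two staged passes:
-- an index-based scan that splits the queue into greedy batches of floors, then a
-- separate counting pass over the batches (objective: alternative, same cost).

-- ===== PORT A =====
-- inner load loop: while people and people_count+1 <= max_people and curr_weight+people[0][0] <= max_weight
-- (returns the remaining queue and in_elevator, which is all the rest of A's body reads)
def fillA (people inEl : List (Int × Int)) (cw pc mp mw : Int) :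
    List (Int × Int) × List (Int × Int) :=
  match people with
  | [] => ([], inEl)
  | p :: rest =>
    if pc + 1 ≤ mp ∧ cw + p.1 ≤ mw then
      fillA rest (inEl ++ [p]) (cw + p.1) (pc + 1) mp mw
    else (p :: rest, inEl)

-- inner delivery loop: while in_elevator: pop, bump trip_count on floor change
def deliverA (inEl : List (Int × Int)) (cf tc : Int) : Int :=
  match inEl with
  | [] => tc
  | p :: rest => if cf ≠ p.2 then deliverA rest p.2 (tc + 1) else deliverA rest cf tc

-- outer `while people` loop; fuel makes it total (Python A diverges when a batch is empty:
-- whenever Python A terminates each batch is nonempty, so at most n rounds run and fuel n+1 suffices)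
def outerA (fuel : Nat) (people : List (Int × Int)) (tc mp mw : Int) : Int :=
  match fuel with
  | 0 => tc
  | fuel + 1 =>
    match people with
    | [] => tc
    | _ :: _ =>
      let fr := fillA people [] 0 0 mp mw
      let tc' := deliverA fr.2 1 tc
      outerA fuel fr.1 (tc' + 1) mp mw

def elevator_trips (people_weight : List Int) (people_floors : List Int) (elevator_floors : Int) (max_people : Int) (max_weight : Int) : Int :=
  outerA ((people_weight.zip people_floors).length + 1)
    (people_weight.zip people_floors) 0 max_people max_weight

-- ===== PORT B =====
-- Source B inner while: scan from index i while i < n, len(floors) < max_people and pairs[i][0] <= cap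
-- (i < n = pairs.length keeps every access in range, so getD is exact for pairs[i])
def loadB (pairs : List (Int × Int)) (n i : Nat) (floors : List Int) (cap mp : Int) :
    List Int × Nat :=
  if h : i < n ∧ (floors.length : Int) < mp ∧ (pairs.getD i (0, 0)).1 ≤ cap then
    loadB pairs n (i + 1) (floors ++ [(pairs.getD i (0, 0)).2])
      (cap - (pairs.getD i (0, 0)).1) mp
  else (floors, i)
termination_by n - i
decreasing_by omega

-- Source B pass 1 outer while: build the list of batches; fuel is a totality cut (when a
-- batch is empty i stays put and Python loops forever; otherwise n+1 rounds suffice)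
def splitB (fuel : Nat) (pairs : List (Int × Int)) (n i : Nat)
    (batches : List (List Int)) (mp mw : Int) : List (List Int) :=
  match fuel with
  | 0 => batches
  | fuel + 1 =>
    if i < n then
      let r := loadB pairs n i [] mw mp
      splitB fuel pairs n r.2 (batches ++ [r.1]) mp mw
    else batches

-- Source B pass 2: for floors in batches: prev = 1; for f in floors: …; total += 1
def countB (batches : List (List Int)) : Int :=
  batches.foldl
    (fun total floors =>
      (floors.foldl (fun s f => if f ≠ s.2 then (s.1 + 1, f) else s) (total, (1 : Int))).1 + 1)
    0

def elevator_trips_alt (people_weight : List Int) (people_floors : List Int) (elevator_floors : Int) (max_people : Int) (max_weight : Int) : Int :=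
  countB (splitB ((people_weight.zip people_floors).length + 1)
    (people_weight.zip people_floors) (people_weight.zip people_floors).length 0
    [] max_people max_weight)

-- ===== PRECONDITION & SPEC =====
-- Pre_ is exactly where Python A terminates: with a nonempty queue it loops forever as soon
-- as the head of the remaining queue cannot enter an empty elevator, which happens iff
-- max_people < 1 or some weight exceeds max_weight.
def Pre_elevator_trips (people_weight : List Int) (people_floors : List Int) (elevator_floors : Int) (max_people : Int) (max_weight : Int) : Prop :=
  people_weight.zip people_floors = [] ∨
    (1 ≤ max_people ∧ ∀ q ∈ people_weight.zip people_floors, q.1 ≤ max_weight)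
instance (people_weight : List Int) (people_floors : List Int) (elevator_floors : Int) (max_people : Int) (max_weight : Int) : Decidable (Pre_elevator_trips people_weight people_floors elevator_floors max_people max_weight) := by unfold Pre_elevator_trips; infer_instance

def pvWitness_elevator_trips : List Int × List Int × Int × Int × Int :=
  ([50, 30, 70], [2, 3, 2], 5, 2, 100)

def Spec_elevator_trips (people_weight : List Int) (people_floors : List Int) (elevator_floors : Int) (max_people : Int) (max_weight : Int) (out : Int) : Prop := out = elevator_trips_alt people_weight people_floors elevator_floors max_people max_weight
instance (people_weight : List Int) (people_floors : List Int) (elevator_floors : Int) (max_people : Int) (max_weight : Int) (out : Int) : Decidable (Spec_elevator_trips people_weight people_floors elevator_floors max_people max_weight out) := by unfold Spec_elevator_trips; infer_instance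

-- ===== CLAIM (what is proved, stated in full; the proofs are below) =====
def Claim_equal_elevator_trips : Prop := ∀ (people_weight : List Int) (people_floors : List Int) (elevator_floors : Int) (max_people : Int) (max_weight : Int), Dom_elevator_trips people_weight people_floors elevator_floors max_people max_weight → Pre_elevator_trips people_weight people_floors elevator_floors max_people max_weight → Spec_elevator_trips people_weight people_floors elevator_floors max_people max_weight (elevator_trips people_weight people_floors elevator_floors max_people max_weight)

-- ===== LEMMAS AND PROOFS =====

-- abstract greedy batch: floors of the longest fitting prefix, and the rest of the queue
def grab (ps : List (Int × Int)) (room cap : Int) : List Int × List (Int × Int) :=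
  match ps with
  | [] => ([], [])
  | p :: rest =>
    if 1 ≤ room ∧ p.1 ≤ cap then
      let r := grab rest (room - 1) (cap - p.1)
      (p.2 :: r.1, r.2)
    else ([], p :: rest)

-- floor changes starting from prev
def chg (prev : Int) (floors : List Int) : Int :=
  match floors with
  | [] => 0
  | f :: t => if f ≠ prev then 1 + chg f t else chg prev t

theorem grab_length (room cap : Int) :
    ∀ ps : List (Int × Int),
      (grab ps room cap).1.length + (grab ps room cap).2.length = ps.length := by
  intro ps
  induction ps generalizing room cap with
  | nil => simp [grab]
  | cons p rest ih =>
    simp only [grab]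
    split
    · have := ih (room - 1) (cap - p.1)
      simp; omega
    · simp

theorem grab_mem (room cap : Int) :
    ∀ ps : List (Int × Int), ∀ q ∈ (grab ps room cap).2, q ∈ ps := by
  intro ps
  induction ps generalizing room cap with
  | nil => simp [grab]
  | cons p rest ih =>
    intro q hq
    simp only [grab] at hq
    split at hq
    · exact List.mem_cons_of_mem p (ih (room - 1) (cap - p.1) q hq)
    · exact hq

-- abstract total trip count (well-founded on the queue length)
def totG (ps : List (Int × Int)) (mp mw : Int) : Int :=
  match hps : ps with
  | [] => 0
  | p :: rest =>
    if hne : (grab (p :: rest) mp mw).1 = [] then 0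
    else 1 + chg 1 (grab (p :: rest) mp mw).1 + totG (grab (p :: rest) mp mw).2 mp mw
termination_by ps.length
decreasing_by
  have h := grab_length mp mw (p :: rest)
  have : (grab (p :: rest) mp mw).1.length ≠ 0 := by
    simpa [List.length_eq_zero_iff] using hne
  simp at h ⊢; omega

-- abstract batch list
def chunks (ps : List (Int × Int)) (mp mw : Int) : List (List Int) :=
  match hps : ps with
  | [] => []
  | p :: rest =>
    if hne : (grab (p :: rest) mp mw).1 = [] then []
    else (grab (p :: rest) mp mw).1 :: chunks ((grab (p :: rest) mp mw).2) mp mw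
termination_by ps.length
decreasing_by
  have h := grab_length mp mw (p :: rest)
  have : (grab (p :: rest) mp mw).1.length ≠ 0 := by
    simpa [List.length_eq_zero_iff] using hne
  simp at h ⊢; omega

theorem fill_grab (mp mw : Int) :
    ∀ (ps inEl : List (Int × Int)) (cw pc : Int),
      (fillA ps inEl cw pc mp mw).1 = (grab ps (mp - pc) (mw - cw)).2 ∧
      (fillA ps inEl cw pc mp mw).2.map Prod.snd
        = inEl.map Prod.snd ++ (grab ps (mp - pc) (mw - cw)).1 := by
  intro ps
  induction ps with
  | nil => intro inEl cw pc; simp [fillA, grab]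
  | cons p rest ih =>
    intro inEl cw pc
    simp only [fillA, grab]
    by_cases h : pc + 1 ≤ mp ∧ cw + p.1 ≤ mw
    · rw [if_pos h, if_pos (by omega : 1 ≤ mp - pc ∧ p.1 ≤ mw - cw)]
      have := ih (inEl ++ [p]) (cw + p.1) (pc + 1)
      have e1 : mp - (pc + 1) = mp - pc - 1 := by ring
      have e2 : mw - (cw + p.1) = mw - cw - p.1 := by ring
      rw [e1, e2] at this
      simpa using this
    · rw [if_neg h, if_neg (by omega : ¬(1 ≤ mp - pc ∧ p.1 ≤ mw - cw))]
      simp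

theorem deliver_chg :
    ∀ (inEl : List (Int × Int)) (cf tc : Int),
      deliverA inEl cf tc = tc + chg cf (inEl.map Prod.snd) := by
  intro inEl
  induction inEl with
  | nil => intro cf tc; simp [deliverA, chg]
  | cons p rest ih =>
    intro cf tc
    simp only [deliverA, List.map_cons, chg]
    rcases eq_or_ne cf p.2 with he | h
    · subst he; simp [ih]
    · rw [if_pos h, if_pos (Ne.symm h), ih]
      ring

theorem load_grab (mp : Int) (pairs : List (Int × Int)) :
    ∀ (i : Nat) (floors : List Int) (cap : Int), i ≤ pairs.length →
      loadB pairs pairs.length i floors cap mp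
        = (floors ++ (grab (pairs.drop i) (mp - floors.length) cap).1,
           pairs.length - (grab (pairs.drop i) (mp - floors.length) cap).2.length) := by
  intro i
  induction hk : pairs.length - i using Nat.strong_induction_on generalizing i with
  | _ k ih =>
    intro floors cap hi
    by_cases hc : i < pairs.length ∧ (floors.length : Int) < mp ∧ (pairs.getD i (0, 0)).1 ≤ cap
    · obtain ⟨hin, hfl, hcap⟩ := hc
      rw [loadB, dif_pos ⟨hin, hfl, hcap⟩]
      rw [List.getD_eq_getElem pairs (0, 0) hin] at hcap ⊢
      rw [List.drop_eq_getElem_cons hin]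
      simp only [grab]
      rw [if_pos (by constructor <;> [omega; exact hcap])]
      have hrec := ih (pairs.length - (i + 1)) (by omega) (i + 1)
        (by omega) (floors ++ [pairs[i].2]) (cap - pairs[i].1) (by omega)
      rw [hrec]
      have e1 : ((floors ++ [pairs[i].2]).length : Int) = (floors.length : Int) + 1 := by
        simp
      rw [e1]
      have e2 : mp - ((floors.length : Int) + 1) = mp - floors.length - 1 := by ring
      rw [e2]
      simp
    · rw [loadB, dif_neg hc]
      rcases Nat.lt_or_ge i pairs.length with hin | hge
      · rw [List.getD_eq_getElem pairs (0, 0) hin] at hc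
        rw [List.drop_eq_getElem_cons hin]
        simp only [grab]
        have hneg : ¬(1 ≤ mp - (floors.length : Int) ∧ pairs[i].1 ≤ cap) := by
          intro ⟨h1, h2⟩; exact hc ⟨hin, by omega, h2⟩
        rw [if_neg hneg]
        have hlen : (pairs[i] :: pairs.drop (i + 1)).length = pairs.length - i := by
          simp only [List.length_cons, List.length_drop]; omega
        simp only [hlen]
        have : pairs.length - (pairs.length - i) = i := by omega
        simp [this]
      · have hie : i = pairs.length := by omega
        subst hie
        simp [grab]

theorem grab_rest (room cap : Int) :
    ∀ ps : List (Int × Int),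
      (grab ps room cap).2 = ps.drop (grab ps room cap).1.length := by
  intro ps
  induction ps generalizing room cap with
  | nil => simp [grab]
  | cons p rest ih =>
    simp only [grab]
    split
    · simpa using ih (room - 1) (cap - p.1)
    · simp

theorem split_chunks (mp mw : Int) (pairs : List (Int × Int))
    (hmp : 1 ≤ mp) (hall : ∀ q ∈ pairs, q.1 ≤ mw) :
    ∀ (fuel i : Nat) (batches : List (List Int)),
      i ≤ pairs.length → pairs.length - i < fuel →
      splitB fuel pairs pairs.length i batches mp mw
        = batches ++ chunks (pairs.drop i) mp mw := by
  intro fuel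
  induction fuel with
  | zero => intro i batches _ h; omega
  | succ fuel ih =>
    intro i batches hi hfuel
    rcases Nat.lt_or_ge i pairs.length with hin | hge
    · have hload := load_grab mp pairs i [] mw hi
      have hz : ((([] : List Int)).length : Int) = 0 := by simp
      rw [hz, sub_zero] at hload
      set g := grab (pairs.drop i) mp mw with hg
      have hdropc : pairs.drop i = pairs[i] :: pairs.drop (i + 1) :=
        List.drop_eq_getElem_cons hin
      have hg1 : g.1 ≠ [] := by
        rw [hg, hdropc]
        simp only [grab]
        rw [if_pos ⟨hmp, hall pairs[i] (List.getElem_mem hin)⟩]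
        simp
      have hglen := grab_length mp mw (pairs.drop i)
      rw [← hg] at hglen
      have hdl : (pairs.drop i).length = pairs.length - i := by simp
      have hg1pos : 0 < g.1.length := List.length_pos_iff.mpr hg1
      have hrest : g.2 = pairs.drop (i + g.1.length) := by
        rw [hg, grab_rest, ← List.drop_drop]
      have hidx : pairs.length - g.2.length = i + g.1.length := by omega
      have hih := ih (pairs.length - g.2.length) (batches ++ [g.1])
        (by omega) (by omega)
      rw [splitB, if_pos hin]
      simp only [hload, List.nil_append]
      rw [hih, hidx, ← hrest]
      have hch : chunks (pairs.drop i) mp mw = g.1 :: chunks g.2 mp mw := by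
        rw [hdropc]
        rw [chunks]
        rw [dif_neg (by rw [← hdropc, ← hg]; exact hg1)]
        rw [← hdropc, ← hg]
      rw [hch]
      simp
    · have : i = pairs.length := by omega
      subst this
      rw [splitB, if_neg (by omega)]
      simp [chunks]

theorem count_sum :
    ∀ (bs : List (List Int)), countB bs = (bs.map (fun b => 1 + chg 1 b)).sum := by
  have inner : ∀ (floors : List Int) (total prev : Int),
      (floors.foldl (fun s f => if f ≠ s.2 then (s.1 + 1, f) else s) (total, prev)).1
        = total + chg prev floors := by
    intro floors
    induction floors with
    | nil => intro total prev; simp [chg]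
    | cons f t ih =>
      intro total prev
      simp only [List.foldl_cons, chg]
      rcases eq_or_ne f prev with he | h
      · subst he
        rw [if_neg (by simp), if_neg (by simp)]
        exact ih total f
      · rw [if_pos h, if_pos h, ih]
        ring
  have shift : ∀ (bs : List (List Int)) (a : Int),
      bs.foldl (fun total floors =>
          (floors.foldl (fun s f => if f ≠ s.2 then (s.1 + 1, f) else s) (total, (1 : Int))).1 + 1) a
        = a + (bs.map (fun b => 1 + chg 1 b)).sum := by
    intro bs
    induction bs with
    | nil => intro a; simp
    | cons b t ih =>
      intro a
      simp only [List.foldl_cons, List.map_cons, List.sum_cons]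
      rw [ih, inner]
      ring
  intro bs
  unfold countB
  rw [shift]
  ring

theorem count_chunks (mp mw : Int) :
    ∀ (ps : List (Int × Int)), countB (chunks ps mp mw) = totG ps mp mw := by
  have main : ∀ (k : Nat) (ps : List (Int × Int)), ps.length ≤ k →
      countB (chunks ps mp mw) = totG ps mp mw := by
    intro k
    induction k using Nat.strong_induction_on with
    | _ k ih =>
      intro ps hk
      cases ps with
      | nil => simp [chunks, totG, countB]
      | cons p rest =>
        rw [chunks, totG]
        by_cases hne : (grab (p :: rest) mp mw).1 = []
        · rw [dif_pos hne, dif_pos hne]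
          simp [countB]
        · rw [dif_neg hne, dif_neg hne]
          rw [count_sum, List.map_cons, List.sum_cons, ← count_sum]
          have hglen := grab_length mp mw (p :: rest)
          have hg1pos : 0 < (grab (p :: rest) mp mw).1.length :=
            List.length_pos_iff.mpr hne
          rw [ih ((grab (p :: rest) mp mw).2.length)
            (by simp only [List.length_cons] at hglen hk; omega) _ (le_refl _)]
  intro ps
  exact main ps.length ps (le_refl _)

theorem outer_totG (mp mw : Int) (hmp : 1 ≤ mp) :
    ∀ (fuel : Nat) (ps : List (Int × Int)) (tc : Int),
      (∀ q ∈ ps, q.1 ≤ mw) → ps.length < fuel →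
      outerA fuel ps tc mp mw = tc + totG ps mp mw := by
  intro fuel
  induction fuel with
  | zero => intro ps tc _ h; omega
  | succ fuel ih =>
    intro ps tc hall hlen
    match ps with
    | [] => simp [outerA, totG]
    | p :: rest =>
      rw [outerA]
      have hfill := fill_grab mp mw (p :: rest) [] 0 0
      rw [sub_zero, sub_zero] at hfill
      set g := grab (p :: rest) mp mw with hg
      have hg1 : g.1 ≠ [] := by
        rw [hg]
        simp only [grab]
        rw [if_pos ⟨hmp, hall p (List.mem_cons_self)⟩]
        simp
      have hglen := grab_length mp mw (p :: rest)
      rw [← hg] at hglen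
      have hg1pos : 0 < g.1.length := List.length_pos_iff.mpr hg1
      have hrec := ih g.2 (deliverA (fillA (p :: rest) [] 0 0 mp mw).2 1 tc + 1)
        (fun q hq => hall q (grab_mem mp mw (p :: rest) q (hg ▸ hq)))
        (by simp only [List.length_cons] at hglen hlen; omega)
      simp only [hfill.1]
      rw [hrec, deliver_chg, hfill.2]
      rw [totG, dif_neg (hg ▸ hg1)]
      rw [← hg]
      simp only [List.map_nil, List.nil_append]
      ring

-- ===== VERDICT (by name: the statement is the Claim_ definition above) =====
theorem elevator_trips_spec : Claim_equal_elevator_trips := by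
  intro pw pf ef mp mw _ hpre
  unfold Spec_elevator_trips elevator_trips elevator_trips_alt
  rcases hpre with hz | ⟨hmp, hall⟩
  · rw [hz]; simp [outerA, splitB, countB]
  · rw [outer_totG mp mw hmp _ _ _ hall (by omega),
        split_chunks mp mw _ hmp hall _ 0 [] (by omega) (by omega)]
    simp [count_chunks]
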